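-- pv_equiv track=rewrite | github.com/coffeetrip/Algorithm_TIL | pycharm/ddd.py | search
-- ===== SOURCE A (Python) =====
-- def search(txt):
--     txt = list(txt)
--     i = 1
--     while len(txt) > i:
--         if txt[i] != txt[i-1]:
--             i += 1
--         elif txt[i] == txt[i-1]:
--             txt.pop(i-1)
--             txt.pop(i-1)
--             i = 1
--     return len(txt)
-- ===== SOURCE B (Python) =====
-- def search(txt):
--     stack = []
--     for c in txt:
--         if stack and stack[-1] == c:
--             stack.pop()
--         else:
--             stack.append(c)
--     return len(stack)
-- ===== Notes on version B (the rewrite author's own statement) =====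
-- stated objective: faster
-- what changed: Replaced the restart-from-the-beginning scan-and-pop loop (rescans the list after every removal) with a single left-to-right stack pass that pops on a match and pushes otherwise.
import Mathlib
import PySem

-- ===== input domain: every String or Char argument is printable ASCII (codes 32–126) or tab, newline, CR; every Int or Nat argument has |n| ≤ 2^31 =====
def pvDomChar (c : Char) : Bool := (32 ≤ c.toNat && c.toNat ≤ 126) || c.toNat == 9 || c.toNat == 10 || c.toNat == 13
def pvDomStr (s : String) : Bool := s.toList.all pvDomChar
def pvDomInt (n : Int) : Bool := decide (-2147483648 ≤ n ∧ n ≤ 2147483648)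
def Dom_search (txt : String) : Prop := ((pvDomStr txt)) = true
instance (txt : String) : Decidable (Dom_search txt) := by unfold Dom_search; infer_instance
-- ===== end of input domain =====

-- B replaces A's restart-after-every-removal scan with one O(n) stack pass; return value only.

-- ===== PORT A =====
-- `popIdx l n` is Python's `l.pop(n)` (list after removal) for an in-range non-negative
-- index n, which is the only way A calls it (n = i-1 with 1 ≤ i < len).
def popIdx (l : List Char) (n : Nat) : List Char := l.take n ++ l.drop (n + 1)

theorem popIdx_length_le (l : List Char) (n : Nat) : (popIdx l n).length ≤ l.length := by
  simp [popIdx]; omega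

-- A's while loop: state is the list and the index i.
def loopA (txt : List Char) (i : Nat) : Int :=
  if h : i < txt.length then
    if txt[i] ≠ txt[i-1]! then
      loopA txt (i + 1)
    else
      loopA (popIdx (popIdx txt (i - 1)) (i - 1)) 1
  else
    (txt.length : Int)
termination_by (txt.length, txt.length - i)
decreasing_by
  · exact Prod.Lex.right _ (by omega)
  · apply Prod.Lex.left
    have h1 := popIdx_length_le (popIdx txt (i-1)) (i-1)
    have h2 : (popIdx txt (i-1)).length < txt.length := by
      simp [popIdx]; omega
    omega

def search (txt : String) : Int := loopA txt.toList 1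

-- ===== PORT B =====
def stepB (stack : List Char) (c : Char) : List Char :=
  match stack with
  | x :: t => if x = c then t else c :: x :: t
  | [] => [c]

def search_alt (txt : String) : Int := ((txt.toList.foldl stepB []).length : Int)

-- ===== PRECONDITION & SPEC =====
def Spec_search (txt : String) (out : Int) : Prop := out = search_alt txt
instance (txt : String) (out : Int) : Decidable (Spec_search txt out) := by unfold Spec_search; infer_instance

-- ===== CLAIM (what is proved, stated in full; the proofs are below) =====
def Claim_equal_search : Prop := ∀ (txt : String), Dom_search txt → Spec_search txt (search txt)

-- ===== LEMMAS AND PROOFS =====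

-- the stack never holds two equal adjacent elements
theorem stepB_chain (s : List Char) (c : Char) (h : List.IsChain (· ≠ ·) s) :
    List.IsChain (· ≠ ·) (stepB s c) := by
  cases s with
  | nil => exact List.isChain_singleton c
  | cons x t =>
    simp only [stepB]
    split_ifs with hx
    · exact h.tail
    · exact h.cons_cons (fun e => hx e.symm)

theorem foldl_stepB_chain (l : List Char) (s : List Char) (h : List.IsChain (· ≠ ·) s) :
    List.IsChain (· ≠ ·) (l.foldl stepB s) := by
  induction l generalizing s with
  | nil => exact h
  | cons a l ih => exact ih _ (stepB_chain s a h)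

-- two equal consecutive characters cancel
theorem stepB_cancel (s : List Char) (c : Char) (h : List.IsChain (· ≠ ·) s) :
    stepB (stepB s c) c = s := by
  cases s with
  | nil => simp [stepB]
  | cons x t =>
    by_cases hx : x = c
    · subst hx
      cases t with
      | nil => simp [stepB]
      | cons y t' =>
        have hxy : y ≠ x := fun e => h.rel_head e.symm
        simp [stepB, hxy]
    · simp [stepB, hx]

theorem foldl_stepB_cancel (u v : List Char) (c : Char) (s : List Char)
    (h : List.IsChain (· ≠ ·) s) :
    (u ++ c :: c :: v).foldl stepB s = (u ++ v).foldl stepB s := by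
  simp only [List.foldl_append, List.foldl_cons]
  rw [stepB_cancel _ c (foldl_stepB_chain u s h)]

-- on an adjacent-distinct list the stack just reverses it
theorem foldl_stepB_reverse (l : List Char) (s : List Char)
    (hl : List.IsChain (· ≠ ·) l)
    (hc : ∀ a ∈ l.head?, ∀ b ∈ s.head?, b ≠ a) :
    l.foldl stepB s = l.reverse ++ s := by
  induction l generalizing s with
  | nil => simp
  | cons a l ih =>
    have hstep : stepB s a = a :: s := by
      cases s with
      | nil => simp [stepB]
      | cons x t =>
        have : x ≠ a := hc a (by simp) x (by simp)
        simp [stepB, this]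
    rw [List.foldl_cons, hstep, ih (a :: s) hl.tail]
    · simp
    · intro y hy b hb
      simp at hb; subst hb
      cases l with
      | nil => simp at hy
      | cons z l' =>
        simp at hy; subst hy
        exact hl.rel_head

-- decompose txt around the equal pair at positions i-1, i
theorem txt_decomp (txt : List Char) (i : Nat) (h1 : 1 ≤ i) (h2 : i < txt.length)
    (heq : txt[i] = txt[i-1]!) :
    txt = txt.take (i-1) ++ txt[i-1]! :: txt[i-1]! :: txt.drop (i+1) ∧
    popIdx (popIdx txt (i-1)) (i-1) = txt.take (i-1) ++ txt.drop (i+1) := by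
  have hi1 : i - 1 < txt.length := by omega
  have hget : txt[i-1]! = txt[i-1]'hi1 := by
    rw [getElem!_pos txt (i-1) hi1]
  have hA : (txt.take (i-1)).length = i - 1 := by simp; omega
  have e0 : i - 1 + 1 = i := by omega
  have hdrop : txt.drop (i-1) = txt[i-1]! :: txt[i-1]! :: txt.drop (i+1) := by
    rw [List.drop_eq_getElem_cons hi1, e0, List.drop_eq_getElem_cons h2, heq, hget]
  constructor
  · conv_lhs => rw [← List.take_append_drop (i-1) txt]
    rw [hdrop]
  · have hp1 : popIdx txt (i-1) = txt.take (i-1) ++ txt.drop i := by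
      simp only [popIdx, e0]
    rw [hp1]
    simp only [popIdx]
    rw [List.take_append, List.drop_append, hA, List.take_take]
    have e1 : i - 1 - (i - 1) = 0 := by omega
    have e2 : i - 1 + 1 - (i - 1) = 1 := by omega
    have e3 : min (i-1) (i-1) = i - 1 := by omega
    rw [e1, e2, e3, List.take_zero, List.append_nil,
      List.drop_of_length_le (le_of_eq_of_le hA (by omega)), List.drop_drop]
    simp

-- extending an adjacent-distinct prefix by one distinct element
theorem chain_take_succ (txt : List Char) (i : Nat) (h1 : 1 ≤ i) (h2 : i < txt.length)
    (hc : List.IsChain (· ≠ ·) (txt.take i)) (hne : txt[i] ≠ txt[i-1]!) :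
    List.IsChain (· ≠ ·) (txt.take (i+1)) := by
  have hi1 : i - 1 < txt.length := by omega
  have hget : txt[i-1]! = txt[i-1]'hi1 := getElem!_pos txt (i-1) hi1
  have htk : txt.take (i+1) = txt.take i ++ [txt[i]] := by
    rw [List.take_add_one, List.getElem?_eq_getElem h2]
    rfl
  rw [htk, List.isChain_append]
  refine ⟨hc, List.isChain_singleton _, ?_⟩
  intro x hx y hy
  simp at hy; subst hy
  have hlast : (txt.take i).getLast? = some (txt[i-1]'hi1) := by
    have hlen : (txt.take i).length = i := by simp; omega
    rw [List.getLast?_eq_getElem?, hlen, List.getElem?_take]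
    rw [if_pos (by omega), List.getElem?_eq_getElem hi1]
  rw [hlast] at hx
  simp at hx; subst hx
  rw [hget] at hne
  exact fun e => hne e.symm

theorem chain_take_one (l : List Char) : List.IsChain (· ≠ ·) (l.take 1) := by
  cases l with
  | nil => exact List.isChain_nil
  | cons a t => exact List.isChain_singleton a

-- main loop invariant: loopA computes the stack-pass length
theorem loopA_eq (txt : List Char) (i : Nat) (h1 : 1 ≤ i)
    (hc : List.IsChain (· ≠ ·) (txt.take i)) :
    loopA txt i = ((txt.foldl stepB []).length : Int) := by
  induction txt, i using loopA.induct with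
  | case1 txt i h hne ih =>
    rw [loopA]
    simp only [h, dif_pos]
    rw [if_pos hne]
    exact ih (by omega) (chain_take_succ txt i h1 h hc hne)
  | case2 txt i h hne ih =>
    rw [loopA]
    have heq : txt[i] = txt[i-1]! := by
      by_contra hcon; exact hne hcon
    simp only [h, dif_pos]
    rw [if_neg hne]
    obtain ⟨hdec, hpop⟩ := txt_decomp txt i h1 h heq
    have hcan := foldl_stepB_cancel (txt.take (i-1)) (txt.drop (i+1)) (txt[i-1]!) []
      List.isChain_nil
    rw [ih (by omega) (chain_take_one _), hpop]
    conv_rhs => rw [hdec]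
    rw [hcan]
  | case3 txt i h =>
    rw [loopA]
    rw [dif_neg h]
    have hall : txt.take i = txt := List.take_of_length_le (by omega)
    rw [hall] at hc
    rw [foldl_stepB_reverse txt [] hc (by simp)]
    simp

-- ===== VERDICT (by name: the statement is the Claim_ definition above) =====
theorem search_spec : Claim_equal_search := by
  intro txt _
  unfold Spec_search search search_alt
  exact loopA_eq txt.toList 1 le_rfl (chain_take_one _)
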